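-- pv_equiv track=rewrite | github.com/YichaoOU/HemTools | bin/crispresso2_BE_get_eff.py | find_cut_position
-- ===== SOURCE A (Python) =====
-- def find_cut_position(pos,ref):
--     # print (start,end,ref)
--     rel_pos = -1
--     for i in range(len(ref)):
--         if ref[i]=="-":
--             continue
--         else:
--             rel_pos += 1
--         if rel_pos == pos:
--             return i
-- ===== SOURCE B (Python) =====
-- def find_cut_position(pos, ref):
--     nongap = [i for i, c in enumerate(ref) if c != '-']
--     if 0 <= pos < len(nongap):
--         return nongap[pos]
--     return None
-- ===== Notes on version B (the rewrite author's own statement) =====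
-- stated objective: simpler
-- what changed: Replaces the short-circuiting counter loop (rel_pos accumulator with early return) by building the table of non-gap positions in one comprehension and doing a single bounds-guarded lookup.
import Mathlib
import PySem

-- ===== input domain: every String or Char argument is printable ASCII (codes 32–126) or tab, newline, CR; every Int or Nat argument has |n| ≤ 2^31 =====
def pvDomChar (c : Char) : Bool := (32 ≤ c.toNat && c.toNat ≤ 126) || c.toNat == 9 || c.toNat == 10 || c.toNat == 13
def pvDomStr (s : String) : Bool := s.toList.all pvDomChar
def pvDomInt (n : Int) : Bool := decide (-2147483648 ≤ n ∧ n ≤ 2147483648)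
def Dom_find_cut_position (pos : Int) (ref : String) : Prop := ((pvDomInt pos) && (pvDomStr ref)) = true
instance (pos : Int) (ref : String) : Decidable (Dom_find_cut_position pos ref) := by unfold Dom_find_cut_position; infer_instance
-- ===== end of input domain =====

-- ===== PORT A =====
-- A's loop over range(len(ref)) with rel_pos counter and early return, as structural recursion
-- carrying the index i and rel_pos.
def findCutLoopA (pos : Int) : List Char → Int → Int → Option Int
  | [], _, _ => none
  | c :: rest, i, rel =>
    if c = '-' then findCutLoopA pos rest (i + 1) rel
    else if rel + 1 = pos then some i
    else findCutLoopA pos rest (i + 1) (rel + 1)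

def find_cut_position (pos : Int) (ref : String) : Option Int :=
  findCutLoopA pos ref.toList 0 (-1)

-- ===== PORT B =====
-- B: nongap = [i for i, c in enumerate(ref) if c != '-']; guarded lookup.
def find_cut_position_alt (pos : Int) (ref : String) : Option Int :=
  let nongap : List Int :=
    ((PySem.List.enumerate ref.toList 0).filter (fun p => !(p.2 == '-'))).map (·.1)
  if 0 ≤ pos ∧ pos < nongap.length then nongap[pos.toNat]? else none

-- ===== PRECONDITION & SPEC =====
def Spec_find_cut_position (pos : Int) (ref : String) (out : Option Int) : Prop := out = find_cut_position_alt pos ref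
instance (pos : Int) (ref : String) (out : Option Int) : Decidable (Spec_find_cut_position pos ref out) := by unfold Spec_find_cut_position; infer_instance

-- ===== CLAIM (what is proved, stated in full; the proofs are below) =====
def Claim_equal_find_cut_position : Prop := ∀ (pos : Int) (ref : String), Dom_find_cut_position pos ref → Spec_find_cut_position pos ref (find_cut_position pos ref)

-- ===== LEMMAS AND PROOFS =====

-- ===== VERDICT (by name: the statement is the Claim_ definition above) =====
-- The loop equals a lookup at offset pos - rel - 1 in the non-gap index table starting at i.
theorem findCutLoopA_eq (pos : Int) (cs : List Char) (i rel : Int) :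
    findCutLoopA pos cs i rel =
      (if rel < pos then
        (((PySem.List.enumerate cs i).filter (fun p => !(p.2 == '-'))).map (·.1))[(pos - rel - 1).toNat]?
       else none) := by
  induction cs generalizing i rel with
  | nil => simp [findCutLoopA, PySem.List.enumerate_nil]
  | cons c rest ih =>
    simp only [findCutLoopA, PySem.List.enumerate_cons]
    by_cases hc : c = '-'
    · simp [hc, ih]
    · simp only [hc, if_false, List.filter_cons, beq_iff_eq, hc, Bool.not_eq_eq_eq_not,
        Bool.not_true, decide_eq_false hc]
      by_cases hm : rel + 1 = pos
      · have h1 : rel < pos := by omega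
        have h2 : (pos - rel - 1).toNat = 0 := by omega
        simp [hm, h1, h2, hc]
      · rw [if_neg hm, ih]
        by_cases hlt : rel + 1 < pos
        · have h1 : rel < pos := by omega
          have h2 : (pos - rel - 1).toNat = (pos - (rel + 1) - 1).toNat + 1 := by omega
          simp [hlt, h1, h2, hc]
        · by_cases h1 : rel < pos
          · omega
          · simp [hlt, h1]

theorem find_cut_position_spec : Claim_equal_find_cut_position := by
  intro pos ref _
  unfold Spec_find_cut_position find_cut_position find_cut_position_alt
  rw [findCutLoopA_eq]
  have hsimp : pos - (-1) - 1 = pos := by omega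
  rw [hsimp]
  by_cases h0 : 0 ≤ pos
  · have h1 : (-1 : Int) < pos := by omega
    rw [if_pos h1]
    by_cases h2 : pos < (((PySem.List.enumerate ref.toList 0).filter (fun p => !(p.2 == '-'))).map (·.1)).length
    · simp [h0]
    · rw [if_neg (by exact fun h => h2 h.2)]
      exact List.getElem?_eq_none (by omega)
  · rw [if_neg (by omega), if_neg (by exact fun h => h0 h.1)]
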